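-- pv_equiv track=rewrite | github.com/datvodinh/rag-chatbot | chatbot/chatbot/app.py | messages_to_history
-- ===== SOURCE A (Python) =====
-- def messages_to_history(messages: list[dict[str, str]]) -> list[list[str, str]]:
--     if len(messages) == 0:
--         return []
--     else:
--         history = []
--         holder = []
--         for data in messages:
--             holder.append(data['content'])
--             if len(holder) == 2:
--                 history.append(holder)
--                 holder = []
--         return history
-- ===== SOURCE B (Python) =====
-- def messages_to_history(messages: list[dict[str, str]]) -> list[list[str]]:
--     contents = [d['content'] for d in messages]
--
--     def pairs(xs):
--         if len(xs) < 2: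
--             return []
--         return [[xs[0], xs[1]]] + pairs(xs[2:])
--
--     return pairs(contents)
-- ===== Notes on version B (the rewrite author's own statement) =====
-- stated objective: simpler
-- what changed: Replaces A's single-pass flush-at-two holder accumulator with a two-phase computation: project all contents first, then pair them by structural recursion two at a time.
import Mathlib
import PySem

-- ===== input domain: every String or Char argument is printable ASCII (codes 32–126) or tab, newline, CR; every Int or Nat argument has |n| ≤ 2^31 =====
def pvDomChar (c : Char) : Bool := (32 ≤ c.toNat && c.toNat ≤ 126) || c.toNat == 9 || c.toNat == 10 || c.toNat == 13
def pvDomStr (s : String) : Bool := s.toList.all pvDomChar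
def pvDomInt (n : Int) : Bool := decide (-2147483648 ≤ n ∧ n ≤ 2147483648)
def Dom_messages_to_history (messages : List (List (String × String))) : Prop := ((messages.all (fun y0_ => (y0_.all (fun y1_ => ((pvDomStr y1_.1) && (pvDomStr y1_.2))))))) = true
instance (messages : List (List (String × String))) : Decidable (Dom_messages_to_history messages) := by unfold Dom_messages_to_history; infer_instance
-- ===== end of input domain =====

-- B changes the decomposition only: project the contents, then pair by recursion, instead of
-- A's single-pass holder that flushes at length 2. Same cost; proof of return-value equality on Pre_.

-- data['content'] (first match in the association list; missing key = KeyError, excluded by Pre_)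
def pvContent (d : List (String × String)) : String :=
  ((PySem.Dict.mk d).get? "content").getD ""

-- ===== PORT A =====
-- the loop: for data in messages: holder.append(content); if len(holder)==2: flush
def pvLoopA : List (List (String × String)) → List String → List (List String) → List (List String)
  | [], _, history => history
  | data :: rest, holder, history =>
    let holder' := holder ++ [pvContent data]
    if holder'.length = 2 then pvLoopA rest [] (history ++ [holder'])
    else pvLoopA rest holder' history

def messages_to_history (messages : List (List (String × String))) : List (List String) :=
  if messages.length = 0 then []
  else pvLoopA messages [] []

-- ===== PORT B =====
def pvPairs : List String → List (List String)
  | x :: y :: rest => [x, y] :: pvPairs rest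
  | _ => []

def messages_to_history_alt (messages : List (List (String × String))) : List (List String) :=
  pvPairs (messages.map pvContent)

-- ===== PRECONDITION & SPEC =====
-- Pre_ excludes exactly the inputs where some message lacks the key 'content' (A raises KeyError).
def Pre_messages_to_history (messages : List (List (String × String))) : Prop :=
  (messages.all (fun d => d.any (fun p => p.1 == "content"))) = true
instance (messages : List (List (String × String))) : Decidable (Pre_messages_to_history messages) := by unfold Pre_messages_to_history; infer_instance
def pvWitness_messages_to_history : (List (List (String × String))) :=
  [[("content", "hi")], [("content", "there")], [("role", "user"), ("content", "x")]]
def Spec_messages_to_history (messages : List (List (String × String))) (out : List (List String)) : Prop := out = messages_to_history_alt messages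
instance (messages : List (List (String × String))) (out : List (List String)) : Decidable (Spec_messages_to_history messages out) := by unfold Spec_messages_to_history; infer_instance

-- ===== CLAIM =====
def Claim_equal_messages_to_history : Prop := ∀ (messages : List (List (String × String))), Dom_messages_to_history messages → Pre_messages_to_history messages → Spec_messages_to_history messages (messages_to_history messages)

-- ===== LEMMAS AND PROOFS =====
-- Loop invariant: with an empty holder the loop appends exactly the pairs of the remaining
-- contents; with a one-element holder [x], the pairs of x consed onto the remaining contents.
theorem pvLoopA_inv (msgs : List (List (String × String))) :
    (∀ acc, pvLoopA msgs [] acc = acc ++ pvPairs (msgs.map pvContent)) ∧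
    (∀ acc x, pvLoopA msgs [x] acc = acc ++ pvPairs (x :: msgs.map pvContent)) := by
  induction msgs with
  | nil => simp [pvLoopA, pvPairs]
  | cons d rest ih =>
    refine ⟨fun acc => ?_, fun acc x => ?_⟩
    · simp only [pvLoopA, List.nil_append, List.length_cons, List.length_nil]
      rw [if_neg (by omega)]
      exact (ih.2 acc (pvContent d))
    · simp only [pvLoopA, List.cons_append, List.nil_append, List.length_cons, List.length_nil]
      rw [if_pos (by decide), ih.1, List.map_cons, pvPairs]
      simp

-- ===== VERDICT =====
theorem messages_to_history_spec : Claim_equal_messages_to_history := by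
  intro messages _ _
  unfold Spec_messages_to_history messages_to_history messages_to_history_alt
  split
  · next h => simp [List.length_eq_zero_iff.mp h, pvPairs]
  · simpa using (pvLoopA_inv messages).1 []
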